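-- pv_equiv track=rewrite | github.com/FServais/IEEEXtreme-2015 | spock/main.py | score_evt_update
-- ===== SOURCE A (Python) =====
-- def score_evt_update(alice_score, evt_lst, n=1):
--     for evt in evt_lst:
--         if evt == "A":
--             alice_score[0] += n
--         elif evt == "B":
--             alice_score[2] += n
--         else:
--             alice_score[1] += n
--     return alice_score
-- ===== SOURCE B (Python) =====
-- def score_evt_update(alice_score, evt_lst, n=1):
--     a = evt_lst.count("A")
--     b = evt_lst.count("B")
--     other = len(evt_lst) - a - b
--     if a:
--         alice_score[0] += a * n
--     if other:
--         alice_score[1] += other * n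
--     if b:
--         alice_score[2] += b * n
--     return alice_score
-- ===== Notes on version B (the rewrite author's own statement) =====
-- stated objective: idiomatic
-- what changed: B replaces the per-event three-way branch with a single tally pass (list.count for A and B, the 'other' bucket derived by subtraction from the length) followed by at most three fixed bucket updates, applied only when the bucket is non-empty so the raising behaviour on short score lists matches A.
import Mathlib
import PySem

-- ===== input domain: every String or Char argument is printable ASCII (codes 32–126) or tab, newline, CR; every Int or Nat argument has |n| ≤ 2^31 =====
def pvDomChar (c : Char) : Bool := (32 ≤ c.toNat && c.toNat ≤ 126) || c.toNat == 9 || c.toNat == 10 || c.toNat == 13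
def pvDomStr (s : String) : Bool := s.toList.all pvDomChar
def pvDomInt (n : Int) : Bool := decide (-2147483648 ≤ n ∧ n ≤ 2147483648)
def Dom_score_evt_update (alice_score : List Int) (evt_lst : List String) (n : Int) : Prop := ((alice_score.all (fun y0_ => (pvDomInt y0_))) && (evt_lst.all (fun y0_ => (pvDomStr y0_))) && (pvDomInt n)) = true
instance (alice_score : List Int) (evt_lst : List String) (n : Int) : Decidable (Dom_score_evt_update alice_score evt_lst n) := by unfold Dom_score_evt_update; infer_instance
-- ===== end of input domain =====

-- B replaces A's per-event three-way branch by one tally (count of "A", count of "B",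
-- 'other' by subtraction from the length) and at most three fixed bucket updates.
-- Return-value equivalence; both Pythons mutate alice_score in place the same way.

-- 'xs[i] += v' : in-range in-place addition (Pre_ excludes the out-of-range inputs,
-- where Python raises IndexError; out of range this helper is a no-op).
def pvBump : List Int → Nat → Int → List Int
  | [], _, _ => []
  | x :: xs, 0, v => (x + v) :: xs
  | x :: xs, i + 1, v => x :: pvBump xs i v

-- ===== PORT A =====
def score_evt_update (alice_score : List Int) (evt_lst : List String) (n : Int) : List Int :=
  evt_lst.foldl (fun s evt =>
    if evt = "A" then pvBump s 0 n
    else if evt = "B" then pvBump s 2 n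
    else pvBump s 1 n) alice_score

-- ===== PORT B =====
def score_evt_update_alt (alice_score : List Int) (evt_lst : List String) (n : Int) : List Int :=
  let a : Int := PySem.List.count evt_lst "A"
  let b : Int := PySem.List.count evt_lst "B"
  let other : Int := (evt_lst.length : Int) - a - b
  let s1 := if a ≠ 0 then pvBump alice_score 0 (a * n) else alice_score
  let s2 := if other ≠ 0 then pvBump s1 1 (other * n) else s1
  if b ≠ 0 then pvBump s2 2 (b * n) else s2

-- ===== PRECONDITION & SPEC =====
-- Pre_ excludes exactly the inputs on which Python A raises IndexError: an event hits a
-- score slot the list does not have (B raises on exactly the same inputs).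
def Pre_score_evt_update (alice_score : List Int) (evt_lst : List String) (n : Int) : Prop :=
  ("A" ∈ evt_lst → 1 ≤ alice_score.length) ∧
  ((∃ x ∈ evt_lst, x ≠ "A" ∧ x ≠ "B") → 2 ≤ alice_score.length) ∧
  ("B" ∈ evt_lst → 3 ≤ alice_score.length)
instance (alice_score : List Int) (evt_lst : List String) (n : Int) : Decidable (Pre_score_evt_update alice_score evt_lst n) := by unfold Pre_score_evt_update; infer_instance
def pvWitness_score_evt_update : List Int × List String × Int := ([3, 1, 4], ["A", "B", "tie"], 2)

def Spec_score_evt_update (alice_score : List Int) (evt_lst : List String) (n : Int) (out : List Int) : Prop := out = score_evt_update_alt alice_score evt_lst n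
instance (alice_score : List Int) (evt_lst : List String) (n : Int) (out : List Int) : Decidable (Spec_score_evt_update alice_score evt_lst n out) := by unfold Spec_score_evt_update; infer_instance

-- ===== CLAIM (what is proved, stated in full; the proofs are below) =====
def Claim_equal_score_evt_update : Prop := ∀ (alice_score : List Int) (evt_lst : List String) (n : Int), Dom_score_evt_update alice_score evt_lst n → Pre_score_evt_update alice_score evt_lst n → Spec_score_evt_update alice_score evt_lst n (score_evt_update alice_score evt_lst n)

-- ===== LEMMAS AND PROOFS =====

theorem pvBump_zero (s : List Int) (i : Nat) : pvBump s i 0 = s := by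
  induction s generalizing i with
  | nil => rfl
  | cons x xs ih => cases i with
    | zero => simp [pvBump]
    | succ j => simp [pvBump, ih]

theorem pvBump_bump_same (s : List Int) (i : Nat) (m k : Int) :
    pvBump (pvBump s i m) i k = pvBump s i (m + k) := by
  induction s generalizing i with
  | nil => rfl
  | cons x xs ih => cases i with
    | zero => simp [pvBump]; ring
    | succ j => simp [pvBump, ih]

theorem pvBump_comm (s : List Int) (i j : Nat) (m k : Int) :
    pvBump (pvBump s i m) j k = pvBump (pvBump s j k) i m := by
  induction s generalizing i j with
  | nil => rfl
  | cons x xs ih =>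
    cases i with
    | zero => cases j with
      | zero => simp [pvBump]; ring
      | succ j' => simp [pvBump]
    | succ i' => cases j with
      | zero => simp [pvBump]
      | succ j' => simp [pvBump, ih]

-- A's fold characterised as the three-bucket composite update.
theorem foldA_eq (e : List String) (n : Int) (s : List Int) :
    e.foldl (fun s evt =>
      if evt = "A" then pvBump s 0 n
      else if evt = "B" then pvBump s 2 n
      else pvBump s 1 n) s =
    pvBump (pvBump (pvBump s 0 ((e.count "A" : Int) * n))
      1 (((e.length : Int) - (e.count "A" : Int) - (e.count "B" : Int)) * n))
      2 ((e.count "B" : Int) * n) := by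
  induction e generalizing s with
  | nil => simp [pvBump_zero]
  | cons evt rest ih =>
    simp only [List.foldl_cons]
    by_cases hA : evt = "A"
    · rw [if_pos hA, ih, pvBump_bump_same]
      simp only [hA, List.count_cons_self, List.count_cons_of_ne (by decide : "A" ≠ "B"),
        List.length_cons]
      congr 2 <;> push_cast <;> ring
    · rw [if_neg hA]
      by_cases hB : evt = "B"
      · rw [if_pos hB, ih]
        rw [pvBump_comm (pvBump (pvBump s 2 n) 0 _) 1 2,
            pvBump_comm (pvBump s 2 n) 0 2, pvBump_bump_same,
            pvBump_comm _ 2 0, pvBump_comm _ 2 1]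
        simp only [hB, List.count_cons_self, List.count_cons_of_ne (by decide : "B" ≠ "A"),
          List.length_cons]
        congr 2 <;> push_cast <;> ring
      · rw [if_neg hB, ih]
        rw [pvBump_comm (pvBump s 1 n) 0 1, pvBump_bump_same,
            pvBump_comm _ 1 0]
        simp only [List.count_cons_of_ne hA, List.count_cons_of_ne hB,
          List.length_cons]
        congr 2
        push_cast; ring

-- B equals the same composite: a skipped guard is a bump by 0.
theorem altB_eq (s : List Int) (e : List String) (n : Int) :
    score_evt_update_alt s e n =
    pvBump (pvBump (pvBump s 0 ((e.count "A" : Int) * n))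
      1 (((e.length : Int) - (e.count "A" : Int) - (e.count "B" : Int)) * n))
      2 ((e.count "B" : Int) * n) := by
  unfold score_evt_update_alt
  simp only [PySem.List.count_eq]
  split_ifs with h1 h2 h3 h4 h5 h6 h7 <;> simp_all [pvBump_zero]

-- ===== VERDICT (by name: the statement is the Claim_ definition above) =====
theorem score_evt_update_spec : Claim_equal_score_evt_update := by
  intro alice_score evt_lst n _ _
  unfold Spec_score_evt_update score_evt_update
  rw [foldA_eq, altB_eq]
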